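-- pv_equiv track=rewrite | github.com/Ryzhtus/master-thesis | named_entity_recognition/reader_v2.py | __make_sentence_mask
-- ===== SOURCE A (Python) =====
-- def __make_sentence_mask(document: list, counter: dict):
--     masks = []
--     for sentence in document:
--         sentence_mask = [-1 for x in range(len(sentence))]
--         for key in list(counter.keys()):
--             entity = key
--             window_size = len(entity.split(' '))
--             for window_start in range(0, len(sentence) - window_size):
--                 if ' '.join(sentence[window_start: window_start + window_size]) == entity:
--                     for idx in range(window_start, window_start + window_size):
--                         sentence_mask[idx] = 1
--         masks.append(sentence_mask)
--
--     return masks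
-- ===== SOURCE B (Python) =====
-- def __make_sentence_mask(document: list, counter: dict):
--     keys = list(counter.keys())
--     groups = [(w, {k for k in keys if len(k.split(' ')) == w})
--               for w in sorted({len(k.split(' ')) for k in keys})]
--     masks = []
--     for sentence in document:
--         n = len(sentence)
--         matches = []
--         for w, entities in groups:
--             for start in range(n - w):
--                 if ' '.join(sentence[start:start + w]) in entities:
--                     matches.append((start, w))
--         masks.append([1 if any(s <= i < s + w for (s, w) in matches) else -1
--                       for i in range(n)])
--     return masks
-- ===== Notes on version B (the rewrite author's own statement) =====
-- stated objective: faster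
-- what changed: B groups the entities once into per-word-length sets and slides each sentence once per distinct length with an O(1)-expected set lookup, collecting (start,width) matches and building each mask positionally, instead of A's rescan of every sentence window separately for every entity with in-place marking.
import Mathlib
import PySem

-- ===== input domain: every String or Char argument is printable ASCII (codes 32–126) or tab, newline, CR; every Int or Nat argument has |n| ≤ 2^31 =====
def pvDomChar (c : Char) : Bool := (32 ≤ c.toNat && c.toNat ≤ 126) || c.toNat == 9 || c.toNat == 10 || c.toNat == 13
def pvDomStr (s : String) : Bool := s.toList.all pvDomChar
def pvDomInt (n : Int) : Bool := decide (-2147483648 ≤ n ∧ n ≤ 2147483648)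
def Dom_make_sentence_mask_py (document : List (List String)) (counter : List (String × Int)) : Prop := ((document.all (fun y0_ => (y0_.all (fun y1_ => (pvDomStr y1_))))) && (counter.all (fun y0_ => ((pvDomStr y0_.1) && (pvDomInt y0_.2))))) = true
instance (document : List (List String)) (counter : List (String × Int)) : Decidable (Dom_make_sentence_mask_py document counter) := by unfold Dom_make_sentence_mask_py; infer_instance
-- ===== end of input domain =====

-- B groups the entities once into per-word-length sets and slides each sentence once per
-- distinct length with a set lookup, instead of A's per-entity rescan of every sentence.

-- len(key.split(' ')) — used by both programs; ' ' ≠ '' so split? is always some, getD [] is exact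
def pvSplitLen (k : String) : Int := (((PySem.Str.split? k " ").getD []).length : Int)

-- ===== PORT A =====
-- inner 'for key …: for window_start …: if joined window == key: mark the window' loops of A
def pvWindowA (sentence : List String) (key : String) (mask : List Int) : List Int :=
  (PySem.List.pyRange 0 ((sentence.length : Int) - pvSplitLen key)).foldl
    (fun sentence_mask window_start =>
      if PySem.Str.join " " (PySem.List.slice sentence (some window_start) (some (window_start + pvSplitLen key))) = key then
        (PySem.List.pyRange window_start (window_start + pvSplitLen key)).foldl
          (fun m idx => PySem.List.pySetD m idx 1) sentence_mask
      else sentence_mask)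
    mask

def make_sentence_mask_py (document : List (List String)) (counter : List (String × Int)) : List (List Int) :=
  document.foldl
    (fun masks sentence =>
      masks ++ [((PySem.Dict.ofList counter).keys).foldl
        (fun sentence_mask key => pvWindowA sentence key sentence_mask)
        (List.replicate sentence.length (-1 : Int))])
    []

-- ===== PORT B =====
-- groups = [(w, {k for k in keys if len(k.split(' ')) == w}) for w in sorted({len(k.split(' ')) for k in keys})]
def pvGroups (keys : List String) : List (Int × PySem.Set String) :=
  (PySem.List.sorted (PySem.Set.ofList (keys.map pvSplitLen)) (fun x => x) false).map
    (fun w => (w, PySem.Set.ofList (keys.filter (fun k => pvSplitLen k == w))))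

-- collect (start, w) of every window whose join is an entity of length w
def pvMatchesB (sentence : List String) (groups : List (Int × PySem.Set String)) : List (Int × Int) :=
  groups.foldl
    (fun ms g =>
      (PySem.List.pyRange 0 ((sentence.length : Int) - g.1)).foldl
        (fun ms start =>
          if PySem.Set.contains g.2 (PySem.Str.join " " (PySem.List.slice sentence (some start) (some (start + g.1)))) then
            ms ++ [(start, g.1)]
          else ms)
        ms)
    []

def make_sentence_mask_py_alt (document : List (List String)) (counter : List (String × Int)) : List (List Int) :=
  let groups := pvGroups ((PySem.Dict.ofList counter).keys)
  document.foldl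
    (fun masks sentence =>
      masks ++ [(PySem.List.pyRange 0 (sentence.length : Int)).map
        (fun i => if (pvMatchesB sentence groups).any (fun m => decide (m.1 ≤ i ∧ i < m.1 + m.2)) then (1 : Int) else -1)])
    []

-- ===== PRECONDITION & SPEC =====
def Spec_make_sentence_mask_py (document : List (List String)) (counter : List (String × Int)) (out : List (List Int)) : Prop := out = make_sentence_mask_py_alt document counter
instance (document : List (List String)) (counter : List (String × Int)) (out : List (List Int)) : Decidable (Spec_make_sentence_mask_py document counter out) := by unfold Spec_make_sentence_mask_py; infer_instance

-- ===== CLAIM (what is proved, stated in full; the proofs are below) =====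
def Claim_equal_make_sentence_mask_py : Prop := ∀ (document : List (List String)) (counter : List (String × Int)), Dom_make_sentence_mask_py document counter → Spec_make_sentence_mask_py document counter (make_sentence_mask_py document counter)

-- ===== LEMMAS AND PROOFS =====

theorem pv_foldMark {β : Type} (n : Nat) (L : List β) (F : List Int → β → List Int) (P : β → Nat → Bool)
    (hF : ∀ b ∈ L, ∀ m : List Int, m.length = n →
      (F m b).length = n ∧ ∀ i : Nat, (F m b)[i]? = if P b i then some 1 else m[i]?) :
    ∀ m : List Int, m.length = n →
      (L.foldl F m).length = n ∧
      ∀ i : Nat, (L.foldl F m)[i]? = if L.any (fun b => P b i) then some 1 else m[i]? := by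
  induction L with
  | nil => intro m hm; simpa using hm
  | cons b t ih =>
    intro m hm
    obtain ⟨h1, h2⟩ := hF b (by simp) m hm
    have ih' := ih (fun b' hb' m' hm' => hF b' (by simp [hb']) m' hm') (F m b) h1
    refine ⟨ih'.1, fun i => ?_⟩
    rw [List.foldl_cons, ih'.2 i, h2 i]
    by_cases hb : P b i = true <;> by_cases ht : t.any (fun b => P b i) = true <;>
      simp [hb, ht, List.any_cons]

theorem pv_mark (n : Nat) (a w : Int) (h0 : 0 ≤ a) (hle : a + w ≤ (n : Int)) :
    ∀ m : List Int, m.length = n →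
      ((PySem.List.pyRange a (a + w)).foldl (fun m idx => PySem.List.pySetD m idx 1) m).length = n ∧
      ∀ i : Nat, ((PySem.List.pyRange a (a + w)).foldl (fun m idx => PySem.List.pySetD m idx 1) m)[i]? =
        if decide (a ≤ (i : Int) ∧ (i : Int) < a + w) then some 1 else m[i]? := by
  intro m hm
  have key := pv_foldMark n (PySem.List.pyRange a (a + w))
      (fun m idx => PySem.List.pySetD m idx 1) (fun idx i => idx == (i : Int))
      (by
        intro idx hidx m' hm'
        have hr := PySem.List.mem_pyRange_one.mp hidx
        have h0i : 0 ≤ idx := le_trans h0 hr.1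
        have hlt : idx.toNat < m'.length := by rw [hm']; omega
        beta_reduce
        rw [PySem.List.pySetD_of_nonneg m' 1 h0i]
        refine ⟨by simpa using hm', fun i => ?_⟩
        rw [List.getElem?_set]
        by_cases he : idx = (i : Int)
        · have h1 : idx.toNat = i := by omega
          have h2 : i < m'.length := h1 ▸ hlt
          simp [he, h2]
        · have : ¬ (idx.toNat = i) := by omega
          simp [this, he])
      m hm
  refine ⟨key.1, fun i => ?_⟩
  rw [key.2 i]
  by_cases h : a ≤ (i : Int) ∧ (i : Int) < a + w
  · have : (PySem.List.pyRange a (a + w)).any (fun idx => idx == (i : Int)) = true := by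
      refine List.any_eq_true.mpr ⟨(i : Int), PySem.List.mem_pyRange_one.mpr h, by simp⟩
    simp [this, h]
  · have : (PySem.List.pyRange a (a + w)).any (fun idx => idx == (i : Int)) = false := by
      refine List.any_eq_false.mpr ?_
      intro x hx
      have := PySem.List.mem_pyRange_one.mp hx
      simp only [beq_iff_eq]
      omega
    simp [this, h]

theorem pv_windowA (sentence : List String) (key : String) :
    ∀ m : List Int, m.length = sentence.length →
      (pvWindowA sentence key m).length = sentence.length ∧
      ∀ i : Nat, (pvWindowA sentence key m)[i]? =
        if (PySem.List.pyRange 0 ((sentence.length : Int) - pvSplitLen key)).any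
            (fun st => (PySem.Str.join " " (PySem.List.slice sentence (some st) (some (st + pvSplitLen key))) == key)
              && decide (st ≤ (i : Int) ∧ (i : Int) < st + pvSplitLen key))
        then some 1 else m[i]? := by
  have hw : 0 ≤ pvSplitLen key := Int.natCast_nonneg _
  intro m hm
  unfold pvWindowA
  refine pv_foldMark sentence.length _ _
    (fun st i => (PySem.Str.join " " (PySem.List.slice sentence (some st) (some (st + pvSplitLen key))) == key)
              && decide (st ≤ (i : Int) ∧ (i : Int) < st + pvSplitLen key)) ?_ m hm
  intro st hst m' hm'
  have hr := PySem.List.mem_pyRange_one.mp hst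
  beta_reduce
  by_cases hc : PySem.Str.join " " (PySem.List.slice sentence (some st) (some (st + pvSplitLen key))) = key
  · rw [if_pos hc]
    have hmark := pv_mark sentence.length st (pvSplitLen key) hr.1 (by omega) m' hm'
    refine ⟨hmark.1, fun i => ?_⟩
    rw [hmark.2 i]
    simp [hc]
  · rw [if_neg hc]
    refine ⟨hm', fun i => ?_⟩
    simp [hc]

theorem pv_maskA (sentence : List String) (keys : List String) :
    (keys.foldl (fun sm key => pvWindowA sentence key sm) (List.replicate sentence.length (-1 : Int))).length = sentence.length ∧
    ∀ i : Nat,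
      (keys.foldl (fun sm key => pvWindowA sentence key sm) (List.replicate sentence.length (-1 : Int)))[i]? =
      if keys.any (fun k => (PySem.List.pyRange 0 ((sentence.length : Int) - pvSplitLen k)).any
          (fun st => (PySem.Str.join " " (PySem.List.slice sentence (some st) (some (st + pvSplitLen k))) == k)
            && decide (st ≤ (i : Int) ∧ (i : Int) < st + pvSplitLen k)))
      then some 1 else (List.replicate sentence.length (-1 : Int))[i]? := by
  refine pv_foldMark sentence.length keys (fun sm key => pvWindowA sentence key sm)
    (fun k i => (PySem.List.pyRange 0 ((sentence.length : Int) - pvSplitLen k)).any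
          (fun st => (PySem.Str.join " " (PySem.List.slice sentence (some st) (some (st + pvSplitLen k))) == k)
            && decide (st ≤ (i : Int) ∧ (i : Int) < st + pvSplitLen k))) ?_ _ (by simp)
  intro k _ m hm
  exact pv_windowA sentence k m hm

theorem pv_matchesB (sentence : List String) (groups : List (Int × PySem.Set String)) :
    pvMatchesB sentence groups =
      groups.flatMap (fun g =>
        ((PySem.List.pyRange 0 ((sentence.length : Int) - g.1)).filter
          (fun st => PySem.Set.contains g.2 (PySem.Str.join " " (PySem.List.slice sentence (some st) (some (st + g.1)))))).map
          (fun st => (st, g.1))) := by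
  unfold pvMatchesB
  have h1 : pvMatchesB sentence groups = groups.foldl (fun ms g =>
    ms ++ ((PySem.List.pyRange 0 ((sentence.length : Int) - g.1)).filter
      (fun st => PySem.Set.contains g.2 (PySem.Str.join " " (PySem.List.slice sentence (some st) (some (st + g.1)))))).map
      (fun st => (st, g.1))) [] := by
    unfold pvMatchesB
    exact PySem.List.foldl_congr_mem _ _ _ _ (by intro acc g _; exact PySem.List.foldl_append_if _ _ _ _)
  rw [← pvMatchesB, h1, PySem.List.foldl_append_eq_flatMap]
  simp

theorem pv_sentence_eq (sentence : List String) (keys : List String) :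
    keys.foldl (fun sm key => pvWindowA sentence key sm) (List.replicate sentence.length (-1 : Int)) =
    (PySem.List.pyRange 0 (sentence.length : Int)).map
      (fun i => if (pvMatchesB sentence (pvGroups keys)).any (fun m => decide (m.1 ≤ i ∧ i < m.1 + m.2)) then (1 : Int) else -1) := by
  have hA := pv_maskA sentence keys
  have hBlen : ((PySem.List.pyRange 0 (sentence.length : Int)).map
      (fun i => if (pvMatchesB sentence (pvGroups keys)).any (fun m => decide (m.1 ≤ i ∧ i < m.1 + m.2)) then (1 : Int) else -1)).length = sentence.length := by
    simp [PySem.List.length_pyRange_one]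
  apply List.ext_getElem?
  intro i
  by_cases hi : i < sentence.length
  · rw [hA.2 i, PySem.List.getElem?_map_pyRange_zero _ sentence.length i hi]
    have hiff :
        (keys.any (fun k => (PySem.List.pyRange 0 ((sentence.length : Int) - pvSplitLen k)).any
          (fun st => (PySem.Str.join " " (PySem.List.slice sentence (some st) (some (st + pvSplitLen k))) == k)
            && decide (st ≤ (i : Int) ∧ (i : Int) < st + pvSplitLen k))) = true) ↔
        ((pvMatchesB sentence (pvGroups keys)).any (fun m => decide (m.1 ≤ (i : Int) ∧ (i : Int) < m.1 + m.2)) = true) := by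
      rw [pv_matchesB]
      constructor
      · intro h
        obtain ⟨k, hk, hin⟩ := List.any_eq_true.mp h
        obtain ⟨st, hst, hand⟩ := List.any_eq_true.mp hin
        rw [Bool.and_eq_true, beq_iff_eq, decide_eq_true_iff] at hand
        obtain ⟨hjoin, hcov⟩ := hand
        have hr := PySem.List.mem_pyRange_one.mp hst
        refine List.any_eq_true.mpr ⟨(st, pvSplitLen k), ?_, by simpa using hcov⟩
        refine List.mem_flatMap.mpr ⟨(pvSplitLen k, PySem.Set.ofList (keys.filter (fun k' => pvSplitLen k' == pvSplitLen k))), ?_, ?_⟩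
        · unfold pvGroups
          refine List.mem_map.mpr ⟨pvSplitLen k, ?_, rfl⟩
          rw [PySem.List.mem_sorted, PySem.Set.mem_ofList]
          exact List.mem_map.mpr ⟨k, hk, rfl⟩
        · refine List.mem_map.mpr ⟨st, List.mem_filter.mpr ⟨?_, ?_⟩, rfl⟩
          · exact PySem.List.mem_pyRange_one.mpr ⟨hr.1, by omega⟩
          · simp only
            rw [hjoin, PySem.Set.contains_iff, PySem.Set.mem_ofList]
            exact List.mem_filter.mpr ⟨hk, by simp⟩
      · intro h
        obtain ⟨mm, hmm, hcov⟩ := List.any_eq_true.mp h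
        rw [decide_eq_true_iff] at hcov
        obtain ⟨g, hg, hmem⟩ := List.mem_flatMap.mp hmm
        obtain ⟨st, hstf, hrfl⟩ := List.mem_map.mp hmem
        obtain ⟨hst, hcont⟩ := List.mem_filter.mp hstf
        obtain ⟨w, hw, hgdef⟩ := List.mem_map.mp hg
        subst hgdef
        simp only at hcont hcov hst
        subst hrfl
        simp only at hcov
        set k := PySem.Str.join " " (PySem.List.slice sentence (some st) (some (st + w))) with hkdef
        rw [PySem.Set.contains_iff, PySem.Set.mem_ofList] at hcont
        obtain ⟨hkmem, hklen⟩ := List.mem_filter.mp hcont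
        rw [beq_iff_eq] at hklen
        have hr := PySem.List.mem_pyRange_one.mp hst
        refine List.any_eq_true.mpr ⟨k, hkmem, List.any_eq_true.mpr ⟨st, ?_, ?_⟩⟩
        · rw [hklen]; exact PySem.List.mem_pyRange_one.mpr ⟨hr.1, by omega⟩
        · rw [hklen, Bool.and_eq_true, beq_iff_eq, decide_eq_true_iff]
          exact ⟨rfl, hcov⟩
    by_cases hC : (keys.any (fun k => (PySem.List.pyRange 0 ((sentence.length : Int) - pvSplitLen k)).any
          (fun st => (PySem.Str.join " " (PySem.List.slice sentence (some st) (some (st + pvSplitLen k))) == k)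
            && decide (st ≤ (i : Int) ∧ (i : Int) < st + pvSplitLen k))) = true)
    · rw [if_pos hC, if_pos (hiff.mp hC)]
    · rw [if_neg hC, if_neg (fun h => hC (hiff.mpr h)), List.getElem?_replicate, if_pos hi]
  · have h1 : (keys.foldl (fun sm key => pvWindowA sentence key sm) (List.replicate sentence.length (-1 : Int)))[i]? = none := by
      rw [List.getElem?_eq_none_iff, hA.1]; omega
    have h2 : ((PySem.List.pyRange 0 (sentence.length : Int)).map
      (fun i => if (pvMatchesB sentence (pvGroups keys)).any (fun m => decide (m.1 ≤ i ∧ i < m.1 + m.2)) then (1 : Int) else -1))[i]? = none := by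
      rw [List.getElem?_eq_none_iff, hBlen]; omega
    rw [h1, h2]

theorem pv_portA_map (document : List (List String)) (counter : List (String × Int)) :
    make_sentence_mask_py document counter =
      document.map (fun sentence => ((PySem.Dict.ofList counter).keys).foldl
        (fun sm key => pvWindowA sentence key sm) (List.replicate sentence.length (-1 : Int))) := by
  unfold make_sentence_mask_py
  exact (PySem.List.foldl_append_singleton_eq_map _ _ _).trans (by simp)

theorem pv_portB_map (document : List (List String)) (counter : List (String × Int)) :
    make_sentence_mask_py_alt document counter =
      document.map (fun sentence => (PySem.List.pyRange 0 (sentence.length : Int)).map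
        (fun i => if (pvMatchesB sentence (pvGroups ((PySem.Dict.ofList counter).keys))).any
            (fun m => decide (m.1 ≤ i ∧ i < m.1 + m.2)) then (1 : Int) else -1)) := by
  show document.foldl _ [] = _
  exact (PySem.List.foldl_append_singleton_eq_map _ _ _).trans (by simp)

-- ===== VERDICT (by name: the statement is the Claim_ definition above) =====
theorem make_sentence_mask_py_spec : Claim_equal_make_sentence_mask_py := by
  intro document counter _
  show make_sentence_mask_py document counter = make_sentence_mask_py_alt document counter
  rw [pv_portA_map, pv_portB_map]
  apply List.map_congr_left
  intro sentence _
  exact pv_sentence_eq sentence _
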